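-- pv_equiv track=rewrite | github.com/JLiu24-Eng/Retrieval-and-Memory-Augmentation-for-Financial-QA-Study | src/run_finqa_structured_mem0.py | select_entity_facts
-- ===== SOURCE A (Python) =====
-- from typing import Any, Dict, List, Optional, Tuple
--
-- def select_entity_facts(facts: List[str], question: str) -> List[str]:
--     q = question.lower()
--
--     # Simple entity candidates from facts: entity is before '|'
--     entities = []
--     for f in facts:
--         if "|" in f:
--             ent = f.split("|", 1)[0].strip()
--             if ent and ent not in entities:
--                 entities.append(ent)
--
--     # Pick entities that appear in the question (substring match)
--     matched = [e for e in entities if e in q]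
--
--     if not matched:
--         return facts
--
--     # Keep only facts for matched entities
--     kept = []
--     for f in facts:
--         ent = f.split("|", 1)[0].strip() if "|" in f else ""
--         if ent in matched:
--             kept.append(f)
--     return kept if kept else facts
-- ===== SOURCE B (Python) =====
-- def select_entity_facts(facts, question):
--     # Single pass: keep a fact iff its entity (before '|') is nonempty and
--     # occurs in the lowercased question; fall back to all facts if none kept.
--     q = question.lower()
--     kept = []
--     for f in facts:
--         if "|" in f:
--             ent = f.split("|", 1)[0].strip()
--             if ent and ent in q:
--                 kept.append(f)
--     return kept if kept else facts
-- ===== Notes on version B (the rewrite author's own statement) =====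
-- stated objective: simpler
-- what changed: Drops the intermediate deduped 'entities' list and the 'matched' filter entirely: one pass keeps a fact directly when its own entity is nonempty and a substring of the lowercased question, with the same all-facts fallback.
import Mathlib
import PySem

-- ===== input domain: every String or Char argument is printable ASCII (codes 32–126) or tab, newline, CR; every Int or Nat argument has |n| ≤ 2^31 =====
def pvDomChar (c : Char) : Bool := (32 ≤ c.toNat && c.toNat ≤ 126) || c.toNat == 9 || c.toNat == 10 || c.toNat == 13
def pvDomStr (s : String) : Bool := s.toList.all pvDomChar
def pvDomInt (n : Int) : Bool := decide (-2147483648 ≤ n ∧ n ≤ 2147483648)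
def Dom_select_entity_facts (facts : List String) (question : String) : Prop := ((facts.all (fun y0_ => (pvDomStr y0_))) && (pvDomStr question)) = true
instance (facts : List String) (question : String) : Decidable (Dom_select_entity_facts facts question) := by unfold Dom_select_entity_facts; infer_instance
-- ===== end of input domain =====

-- ===== PORT A =====
-- B drops the intermediate entities/matched lists: one pass over facts keeps a
-- fact whose nonempty entity is a substring of the lowercased question (simpler).

-- entity of a fact: f.split("|", 1)[0].strip()
def pvEnt (f : String) : String :=
  PySem.Str.strip (((PySem.Str.splitMax? f "|" 1).getD []).headD "")

def select_entity_facts (facts : List String) (question : String) : List String :=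
  let q := PySem.Str.lower question
  let entities := facts.foldl (fun entities f =>
    if PySem.Str.isIn "|" f then
      let ent := pvEnt f
      if ent ≠ "" ∧ ent ∉ entities then entities ++ [ent] else entities
    else entities) []
  let matched := entities.filter (fun e => PySem.Str.isIn e q)
  if matched.isEmpty then facts
  else
    let kept := facts.foldl (fun kept f =>
      let ent := if PySem.Str.isIn "|" f then pvEnt f else ""
      if ent ∈ matched then kept ++ [f] else kept) []
    if kept.isEmpty then facts else kept

-- ===== PORT B =====
def select_entity_facts_alt (facts : List String) (question : String) : List String :=
  let q := PySem.Str.lower question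
  let kept := facts.foldl (fun kept f =>
    if PySem.Str.isIn "|" f then
      let ent := pvEnt f
      if ent ≠ "" ∧ PySem.Str.isIn ent q then kept ++ [f] else kept
    else kept) []
  if kept.isEmpty then facts else kept

-- ===== PRECONDITION & SPEC =====
def Spec_select_entity_facts (facts : List String) (question : String) (out : List String) : Prop := out = select_entity_facts_alt facts question
instance (facts : List String) (question : String) (out : List String) : Decidable (Spec_select_entity_facts facts question out) := by unfold Spec_select_entity_facts; infer_instance

-- ===== CLAIM (what is proved, stated in full; the proofs are below) =====
def Claim_equal_select_entity_facts : Prop := ∀ (facts : List String) (question : String), Dom_select_entity_facts facts question → Spec_select_entity_facts facts question (select_entity_facts facts question)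

-- ===== LEMMAS AND PROOFS =====

-- membership characterisation of A's deduped entities accumulator
theorem mem_entities_foldl (facts : List String) (acc : List String) (e : String) :
    e ∈ facts.foldl (fun entities f =>
      if PySem.Str.isIn "|" f then
        let ent := pvEnt f
        if ent ≠ "" ∧ ent ∉ entities then entities ++ [ent] else entities
      else entities) acc ↔
    e ∈ acc ∨ (e ≠ "" ∧ ∃ f ∈ facts, PySem.Str.isIn "|" f = true ∧ pvEnt f = e) := by
  induction facts generalizing acc with
  | nil => simp
  | cons f fs ih =>
    simp only [List.foldl_cons, ih, List.mem_cons]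
    by_cases h1 : PySem.Str.isIn "|" f = true
    · simp only [h1, if_pos]
      by_cases h2 : pvEnt f ≠ "" ∧ pvEnt f ∉ acc
      · rw [if_pos h2]
        constructor
        · rintro (hm | hr)
          · rcases List.mem_append.mp hm with hm | hm
            · exact Or.inl hm
            · simp only [List.mem_singleton] at hm
              exact Or.inr ⟨hm ▸ h2.1, f, Or.inl rfl, h1, hm.symm⟩
          · exact Or.inr ⟨hr.1, hr.2.choose, by
              rcases hr.2.choose_spec with ⟨hmem, hrest⟩
              exact ⟨Or.inr hmem, hrest⟩⟩
        · rintro (hm | ⟨hne, g, hg, hbar, hent⟩)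
          · exact Or.inl (List.mem_append.mpr (Or.inl hm))
          · rcases hg with rfl | hg
            · exact Or.inl (List.mem_append.mpr (Or.inr (by simp [hent])))
            · exact Or.inr ⟨hne, g, hg, hbar, hent⟩
      · rw [if_neg h2]
        replace h2 : pvEnt f ≠ "" → pvEnt f ∈ acc :=
          fun hne => not_not.mp (fun hnin => h2 ⟨hne, hnin⟩)
        constructor
        · rintro (hm | hr)
          · exact Or.inl hm
          · exact Or.inr ⟨hr.1, hr.2.choose, by
              rcases hr.2.choose_spec with ⟨hmem, hrest⟩
              exact ⟨Or.inr hmem, hrest⟩⟩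
        · rintro (hm | ⟨hne, g, hg, hbar, hent⟩)
          · exact Or.inl hm
          · rcases hg with rfl | hg
            · exact Or.inl (hent ▸ h2 (hent ▸ hne))
            · exact Or.inr ⟨hne, g, hg, hbar, hent⟩
    · rw [if_neg h1]
      constructor
      · rintro (hm | hr)
        · exact Or.inl hm
        · exact Or.inr ⟨hr.1, hr.2.choose, by
            rcases hr.2.choose_spec with ⟨hmem, hrest⟩
            exact ⟨Or.inr hmem, hrest⟩⟩
      · rintro (hm | ⟨hne, g, hg, hbar, hent⟩)
        · exact Or.inl hm
        · rcases hg with rfl | hg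
          · exact absurd hbar h1
          · exact Or.inr ⟨hne, g, hg, hbar, hent⟩

-- the kept-condition both programs agree on
def pvCondB (q f : String) : Bool :=
  PySem.Str.isIn "|" f && !(pvEnt f == "") && PySem.Str.isIn (pvEnt f) q

-- B's loop is a filter by pvCondB
theorem keptB_eq_filter (facts : List String) (q : String) :
    facts.foldl (fun kept f =>
      if PySem.Str.isIn "|" f then
        let ent := pvEnt f
        if ent ≠ "" ∧ PySem.Str.isIn ent q then kept ++ [f] else kept
      else kept) [] = facts.filter (pvCondB q) := by
  refine Eq.trans (PySem.List.foldl_congr_mem facts _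
      (fun kept f => if pvCondB q f then kept ++ [f] else kept) [] ?_) ?_
  · intro kept f _
    dsimp only
    by_cases h1 : PySem.Str.isIn "|" f = true
    · by_cases h2 : pvEnt f = ""
      · rw [if_pos h1, if_neg (fun h => h.1 h2),
          if_neg (by simp only [pvCondB, Bool.and_eq_true, Bool.not_eq_true', beq_eq_false_iff_ne]; exact fun h => h.1.2 h2)]
      · by_cases h3 : PySem.Str.isIn (pvEnt f) q = true
        · rw [if_pos h1, if_pos ⟨h2, h3⟩,
            if_pos (by simp only [pvCondB, Bool.and_eq_true, Bool.not_eq_true', beq_eq_false_iff_ne]; exact ⟨⟨h1, h2⟩, h3⟩)]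
        · rw [if_pos h1, if_neg (fun h => h3 h.2),
            if_neg (by simp only [pvCondB, Bool.and_eq_true, Bool.not_eq_true', beq_eq_false_iff_ne]; exact fun h => h3 h.2)]
    · rw [if_neg h1,
        if_neg (by simp only [pvCondB, Bool.and_eq_true, Bool.not_eq_true', beq_eq_false_iff_ne]; exact fun h => h1 h.1.1)]
  · rw [PySem.List.foldl_append_if_eq_filter]
    rfl

-- A's loop is the same filter, once 'entities'/'matched' are characterised
set_option maxHeartbeats 1600000 in
theorem keptA_eq_filter (facts : List String) (q : String) :
    (facts.foldl (fun kept f =>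
      let ent := if PySem.Str.isIn "|" f then pvEnt f else ""
      if ent ∈ ((facts.foldl (fun entities f =>
          if PySem.Str.isIn "|" f then
            let ent := pvEnt f
            if ent ≠ "" ∧ ent ∉ entities then entities ++ [ent] else entities
          else entities) []).filter (fun e => PySem.Str.isIn e q)) then kept ++ [f] else kept) [])
    = facts.filter (pvCondB q) := by
  refine Eq.trans (PySem.List.foldl_congr_mem facts _
      (fun kept f => if pvCondB q f then kept ++ [f] else kept) [] ?_) ?_
  · intro kept f hf
    have hmem : ∀ e, e ∈ (facts.foldl (fun entities f =>
        if PySem.Str.isIn "|" f then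
          let ent := pvEnt f
          if ent ≠ "" ∧ ent ∉ entities then entities ++ [ent] else entities
        else entities) []) ↔
        e ≠ "" ∧ ∃ g ∈ facts, PySem.Str.isIn "|" g = true ∧ pvEnt g = e := by
      intro e; rw [mem_entities_foldl]; simp
    dsimp only
    by_cases h1 : PySem.Str.isIn "|" f = true
    · rw [if_pos h1]
      by_cases h2 : pvEnt f = ""
      · rw [if_neg (fun hm => ((hmem _).mp (List.mem_filter.mp hm).1).1 h2),
          if_neg (by simp only [pvCondB, Bool.and_eq_true, Bool.not_eq_true', beq_eq_false_iff_ne]; exact fun h => h.1.2 h2)]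
      · by_cases h3 : PySem.Str.isIn (pvEnt f) q = true
        · rw [if_pos (List.mem_filter.mpr ⟨(hmem _).mpr ⟨h2, f, hf, h1, rfl⟩, h3⟩),
            if_pos (by simp only [pvCondB, Bool.and_eq_true, Bool.not_eq_true', beq_eq_false_iff_ne]; exact ⟨⟨h1, h2⟩, h3⟩)]
        · have hn : pvEnt f ∉ List.filter (fun e => PySem.Str.isIn e q)
              (facts.foldl (fun entities f =>
                if PySem.Str.isIn "|" f then
                  let ent := pvEnt f
                  if ent ≠ "" ∧ ent ∉ entities then entities ++ [ent] else entities
                else entities) []) := fun hm => h3 (List.mem_filter.mp hm).2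
          rw [if_neg hn,
            if_neg (by simp only [pvCondB, Bool.and_eq_true, Bool.not_eq_true', beq_eq_false_iff_ne]; exact fun h => h3 h.2)]
    · rw [if_neg h1,
        if_neg (fun hm => ((hmem _).mp (List.mem_filter.mp hm).1).1 rfl),
        if_neg (by simp only [pvCondB, Bool.and_eq_true, Bool.not_eq_true', beq_eq_false_iff_ne]; exact fun h => h1 h.1.1)]
  · rw [PySem.List.foldl_append_if_eq_filter]
    rfl

-- if no entity matches the question, the filter is empty
theorem filter_nil_of_matched_nil (facts : List String) (q : String)
    (h : (facts.foldl (fun entities f =>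
        if PySem.Str.isIn "|" f then
          let ent := pvEnt f
          if ent ≠ "" ∧ ent ∉ entities then entities ++ [ent] else entities
        else entities) []).filter (fun e => PySem.Str.isIn e q) = []) :
    facts.filter (pvCondB q) = [] := by
  rw [List.filter_eq_nil_iff]
  intro f hf hc
  simp only [pvCondB, Bool.and_eq_true, Bool.not_eq_true', beq_eq_false_iff_ne] at hc
  obtain ⟨⟨h1, h2⟩, h3⟩ := hc
  have hin : pvEnt f ∈ (facts.foldl (fun entities f =>
      if PySem.Str.isIn "|" f then
        let ent := pvEnt f
        if ent ≠ "" ∧ ent ∉ entities then entities ++ [ent] else entities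
      else entities) []) := by
    rw [mem_entities_foldl]
    exact Or.inr ⟨h2, f, hf, h1, rfl⟩
  have : pvEnt f ∈ ((facts.foldl (fun entities f =>
      if PySem.Str.isIn "|" f then
        let ent := pvEnt f
        if ent ≠ "" ∧ ent ∉ entities then entities ++ [ent] else entities
      else entities) []).filter (fun e => PySem.Str.isIn e q)) :=
    List.mem_filter.mpr ⟨hin, h3⟩
  rw [h] at this
  exact absurd this (List.not_mem_nil)

-- ===== VERDICT (by name: the statement is the Claim_ definition above) =====
theorem select_entity_facts_spec : Claim_equal_select_entity_facts := by
  intro facts question _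
  unfold Spec_select_entity_facts select_entity_facts select_entity_facts_alt
  simp only [keptB_eq_filter, keptA_eq_filter]
  by_cases hm : (facts.foldl (fun entities f =>
      if PySem.Str.isIn "|" f then
        let ent := pvEnt f
        if ent ≠ "" ∧ ent ∉ entities then entities ++ [ent] else entities
      else entities) []).filter (fun e => PySem.Str.isIn e (PySem.Str.lower question)) = []
  · rw [if_pos (by rw [hm]; rfl), filter_nil_of_matched_nil facts _ hm]
    simp
  · rw [if_neg (by rw [List.isEmpty_iff]; exact hm)]
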